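-- pv_equiv track=rewrite | github.com/nodashin6/atcoder | alg/yellow/meetinmiddle.py | _bit_aggregate
-- ===== SOURCE A (Python) =====
-- class BitIterator():
--
--     def __init__(self, n_bit, start=0, stop=None):
--         self.n_bit = n_bit
--         self.i = start
--         self.stop = 2**self.n_bit if stop is None else stop
--
--     def __iter__(self):
--         return self
--
--     def __next__(self):
--         if self.i == self.stop:
--             raise StopIteration()
--         seq = [(self.i >> b)&1 for b in range(self.n_bit)]
--         self.i += 1
--         return seq
--
-- def _bit_aggregate(a):
--
--     n = len(a)
--     b = [[] for _ in range(n+1)]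
--     for lst in BitIterator(n):
--         b[sum(lst)].append(sum([ai for i, ai in zip(lst, a) if i]))
--     for bj in b:
--         bj.sort()
--     return b
-- ===== SOURCE B (Python) =====
-- def _bit_aggregate(a):
--     b = [[0]]
--     for x in a:
--         b = [(b[k] if k < len(b) else []) + ([s + x for s in b[k - 1]] if k > 0 else [])
--              for k in range(len(b) + 1)]
--     return [sorted(g) for g in b]
-- ===== Notes on version B (the rewrite author's own statement) =====
-- stated objective: faster
-- what changed: Replaces enumeration of all 2^n bitmasks (rebuilding the bit list and re-summing the subset for each mask) with an incremental subset-sum DP that folds one element at a time into popcount-indexed groups, then sorts each group.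
import Mathlib
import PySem

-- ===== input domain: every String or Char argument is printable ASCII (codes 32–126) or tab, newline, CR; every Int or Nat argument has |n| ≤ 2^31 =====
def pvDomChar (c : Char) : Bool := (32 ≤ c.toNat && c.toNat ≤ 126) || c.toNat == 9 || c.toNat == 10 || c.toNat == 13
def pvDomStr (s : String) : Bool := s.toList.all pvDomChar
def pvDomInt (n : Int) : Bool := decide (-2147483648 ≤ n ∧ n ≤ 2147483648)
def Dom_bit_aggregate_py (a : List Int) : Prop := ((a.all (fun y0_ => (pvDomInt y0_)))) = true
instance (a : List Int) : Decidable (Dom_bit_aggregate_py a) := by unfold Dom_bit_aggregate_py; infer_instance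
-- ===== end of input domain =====

-- B replaces the 2^n bitmask enumeration with an incremental subset-sum DP over popcount groups (objective: faster).

-- ===== PORT A =====
-- seq = [(i >> b) & 1 for b in range(n)]  (BitIterator yields this for i = 0 .. 2^n-1)
def pvBitSeq (n i : Nat) : List Int :=
  (List.range n).map (fun b => (((i >>> b) &&& 1 : Nat) : Int))

-- sum(lst): the slot index b[sum(lst)]. The sum of 0/1 bits is nonnegative, so .toNat is exact here.
def pvSlot (a : List Int) (i : Nat) : Nat := ((pvBitSeq a.length i).sum).toNat

-- sum([ai for i, ai in zip(lst, a) if i])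
def pvVal (a : List Int) (i : Nat) : Int :=
  ((((pvBitSeq a.length i).zip a).filter (fun p => p.1 != 0)).map (fun p => p.2)).sum

-- b[sum(lst)].append(...)  (slot always in range, see pvSlot comment)
def pvUpdA (a : List Int) (b : List (List Int)) (i : Nat) : List (List Int) :=
  b.set (pvSlot a i) (b.getD (pvSlot a i) [] ++ [pvVal a i])

def bit_aggregate_py (a : List Int) : List (List Int) :=
  let n := a.length
  let b := (List.range (2 ^ n)).foldl (pvUpdA a) (List.replicate (n + 1) ([] : List Int))
  b.map (fun bj => PySem.List.sorted bj (fun x => x) false)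

-- ===== PORT B =====
-- b = [(b[k] if k < len(b) else []) + ([s + x for s in b[k-1]] if k > 0 else []) for k in range(len(b)+1)]
def pvStepB (b : List (List Int)) (x : Int) : List (List Int) :=
  (List.range (b.length + 1)).map (fun k =>
    (if k < b.length then b.getD k [] else []) ++
    (if 0 < k then (b.getD (k - 1) []).map (fun s => s + x) else []))

def bit_aggregate_py_alt (a : List Int) : List (List Int) :=
  (a.foldl pvStepB [[0]]).map (fun g => PySem.List.sorted g (fun x => x) false)

-- ===== PRECONDITION & SPEC =====
def Spec_bit_aggregate_py (a : List Int) (out : List (List Int)) : Prop := out = bit_aggregate_py_alt a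
instance (a : List Int) (out : List (List Int)) : Decidable (Spec_bit_aggregate_py a out) := by unfold Spec_bit_aggregate_py; infer_instance

-- ===== CLAIM (what is proved, stated in full; the proofs are below) =====
def Claim_equal_bit_aggregate_py : Prop := ∀ (a : List Int), Dom_bit_aggregate_py a → Spec_bit_aggregate_py a (bit_aggregate_py a)

-- ===== LEMMAS AND PROOFS =====

-- A's unsorted fold
def pvAun (a : List Int) : List (List Int) :=
  (List.range (2 ^ a.length)).foldl (pvUpdA a) (List.replicate (a.length + 1) ([] : List Int))

lemma pvGetD_set (l : List (List Int)) (i k : Nat) (y : List Int) :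
    (l.set i y).getD k [] = if i = k ∧ k < l.length then y else l.getD k [] := by
  simp only [List.getD_eq_getElem?_getD, List.getElem?_set]
  by_cases hik : i = k
  · subst hik
    by_cases hl : i < l.length
    · simp [hl]
    · simp only [hl, and_false, if_false, if_true]
      rw [List.getElem?_eq_none (by omega)]
  · simp [hik]

lemma pvExtGetD (l1 l2 : List (List Int)) (hl : l1.length = l2.length)
    (h : ∀ k, k < l1.length → l1.getD k [] = l2.getD k []) : l1 = l2 := by
  apply List.ext_getElem hl
  intro k h1 h2
  have hk := h k h1
  rwa [List.getD_eq_getElem _ _ h1, List.getD_eq_getElem _ _ h2] at hk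

-- scatter characterization of the append-at-slot fold
lemma pvScat_getD (σ : Nat → Nat) (v : Nat → Int) (L : List Nat) :
    ∀ (b : List (List Int)), (∀ j ∈ L, σ j < b.length) → ∀ (k : Nat),
    (L.foldl (fun b j => b.set (σ j) (b.getD (σ j) [] ++ [v j])) b).getD k [] =
      b.getD k [] ++ (L.filter (fun j => σ j == k)).map v := by
  induction L with
  | nil => intro b _ k; simp
  | cons j L ih =>
    intro b hσ k
    simp only [List.foldl_cons, List.filter_cons]
    rw [ih (b.set (σ j) (b.getD (σ j) [] ++ [v j]))
        (by intro t ht; rw [List.length_set]; exact hσ t (List.mem_cons_of_mem _ ht)) k]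
    rw [pvGetD_set]
    by_cases hjk : σ j = k
    · subst hjk
      have hkl : σ j < b.length := hσ j (List.mem_cons_self)
      rw [if_pos ⟨rfl, hkl⟩]
      have hb : (σ j == σ j) = true := by simp
      rw [hb]
      simp [List.append_assoc]
    · rw [if_neg (by tauto)]
      have hb : (σ j == k) = false := by simp [hjk]
      rw [hb]
      simp

lemma pvFold_length (a : List Int) (L : List Nat) :
    ∀ b : List (List Int), (L.foldl (pvUpdA a) b).length = b.length := by
  induction L with
  | nil => intro b; rfl
  | cons j L ih => intro b; rw [List.foldl_cons, ih]; simp [pvUpdA]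

lemma pvAun_length (a : List Int) : (pvAun a).length = a.length + 1 := by
  unfold pvAun; rw [pvFold_length]; simp

lemma pvBitSeq_length (m j : Nat) : (pvBitSeq m j).length = m := by simp [pvBitSeq]

lemma pvBit_mem (m j : Nat) : ∀ x ∈ pvBitSeq m j, x = 0 ∨ x = 1 := by
  intro y hy
  simp only [pvBitSeq, List.mem_map, List.mem_range] at hy
  obtain ⟨b, _, rfl⟩ := hy
  have h : (j >>> b) &&& 1 = (j >>> b) % 2 := Nat.and_one_is_mod _
  have h2 : (j >>> b) % 2 = 0 ∨ (j >>> b) % 2 = 1 := by omega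
  rcases h2 with h0 | h1
  · left; simp [h, h0]
  · right; simp [h, h1]

lemma pvBitSeq_sum_le (m j : Nat) : (pvBitSeq m j).sum ≤ m := by
  calc (pvBitSeq m j).sum ≤ (pvBitSeq m j).length • (1 : Int) :=
        List.sum_le_card_nsmul _ _ (fun x hx => by
          rcases pvBit_mem m j x hx with h | h <;> simp [h])
    _ = m := by rw [pvBitSeq_length]; simp

lemma pvBitSeq_sum_nonneg (m j : Nat) : 0 ≤ (pvBitSeq m j).sum := by
  apply List.sum_nonneg
  intro x hx
  rcases pvBit_mem m j x hx with h | h <;> simp [h]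

lemma pvBitSeq_low (m j : Nat) (hj : j < 2 ^ m) :
    pvBitSeq (m + 1) j = pvBitSeq m j ++ [0] := by
  unfold pvBitSeq
  rw [List.range_succ, List.map_append]
  congr 1
  simp only [List.map_cons, List.map_nil]
  have h0 : (j >>> m) &&& 1 = 0 := by
    rw [Nat.shiftRight_eq_div_pow, Nat.div_eq_of_lt hj]
    decide
  rw [h0]
  rfl

lemma pvBitSeq_high (m j : Nat) (hj : j < 2 ^ m) :
    pvBitSeq (m + 1) (2 ^ m + j) = pvBitSeq m j ++ [1] := by
  unfold pvBitSeq
  rw [List.range_succ, List.map_append]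
  congr 1
  · apply List.map_congr_left
    intro b hb
    rw [List.mem_range] at hb
    have h2 : (2 : Nat) ^ m = 2 ^ b * 2 ^ (m - b) := by
      rw [← pow_add]; congr 1; omega
    have hdiv : (2 ^ m + j) / 2 ^ b = 2 ^ (m - b) + j / 2 ^ b := by
      rw [h2, Nat.mul_add_div (Nat.two_pow_pos b)]
    have hev : ∃ t, 2 ^ (m - b) = 2 * t := by
      refine ⟨2 ^ (m - b - 1), ?_⟩
      rw [← pow_succ']; congr 1; omega
    obtain ⟨t, ht⟩ := hev
    rw [Nat.shiftRight_eq_div_pow, Nat.shiftRight_eq_div_pow, Nat.and_one_is_mod,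
        Nat.and_one_is_mod, hdiv]
    congr 1
    omega
  · simp only [List.map_cons, List.map_nil]
    have h1 : ((2 ^ m + j) >>> m) &&& 1 = 1 := by
      rw [Nat.shiftRight_eq_div_pow, Nat.add_comm, Nat.add_div_right _ (Nat.two_pow_pos m),
          Nat.div_eq_of_lt hj]
      decide
    rw [h1]
    rfl

lemma pvSlot_le (a : List Int) (i : Nat) : pvSlot a i ≤ a.length := by
  have h := pvBitSeq_sum_le a.length i
  unfold pvSlot
  omega

lemma pvAun_getD (a : List Int) (k : Nat) :
    (pvAun a).getD k [] =
      ((List.range (2 ^ a.length)).filter (fun j => pvSlot a j == k)).map (pvVal a) := by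
  unfold pvAun
  have hσ : ∀ j ∈ List.range (2 ^ a.length),
      pvSlot a j < (List.replicate (a.length + 1) ([] : List Int)).length := by
    intro j _
    rw [List.length_replicate]
    have := pvSlot_le a j
    omega
  have h := pvScat_getD (pvSlot a) (pvVal a) (List.range (2 ^ a.length))
      (List.replicate (a.length + 1) ([] : List Int)) hσ k
  rw [show (List.foldl (pvUpdA a) (List.replicate (a.length + 1) ([] : List Int))
        (List.range (2 ^ a.length))) =
      List.foldl (fun b j => b.set (pvSlot a j) (b.getD (pvSlot a j) [] ++ [pvVal a j]))
        (List.replicate (a.length + 1) ([] : List Int)) (List.range (2 ^ a.length)) from rfl]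
  rw [h]
  by_cases hk : k < a.length + 1 <;>
    simp [List.getD_eq_getElem?_getD, hk]

lemma pvSlot_low (as : List Int) (x : Int) (j : Nat) (hj : j < 2 ^ as.length) :
    pvSlot (as ++ [x]) j = pvSlot as j := by
  unfold pvSlot
  rw [show (as ++ [x]).length = as.length + 1 by simp, pvBitSeq_low as.length j hj]
  simp

lemma pvSlot_high (as : List Int) (x : Int) (j : Nat) (hj : j < 2 ^ as.length) :
    pvSlot (as ++ [x]) (2 ^ as.length + j) = pvSlot as j + 1 := by
  unfold pvSlot
  rw [show (as ++ [x]).length = as.length + 1 by simp, pvBitSeq_high as.length j hj]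
  have h0 := pvBitSeq_sum_nonneg as.length j
  rw [List.sum_append]
  simp
  omega

lemma pvVal_low (as : List Int) (x : Int) (j : Nat) (hj : j < 2 ^ as.length) :
    pvVal (as ++ [x]) j = pvVal as j := by
  unfold pvVal
  rw [show (as ++ [x]).length = as.length + 1 by simp, pvBitSeq_low as.length j hj,
      List.zip_append (by simp [pvBitSeq_length])]
  simp [List.filter_append]

lemma pvVal_high (as : List Int) (x : Int) (j : Nat) (hj : j < 2 ^ as.length) :
    pvVal (as ++ [x]) (2 ^ as.length + j) = pvVal as j + x := by
  unfold pvVal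
  rw [show (as ++ [x]).length = as.length + 1 by simp, pvBitSeq_high as.length j hj,
      List.zip_append (by simp [pvBitSeq_length])]
  simp [List.filter_append]

lemma pvStepB_getD (b : List (List Int)) (x : Int) (k : Nat) (hk : k < b.length + 1) :
    (pvStepB b x).getD k [] =
      (if k < b.length then b.getD k [] else []) ++
      (if 0 < k then (b.getD (k - 1) []).map (fun s => s + x) else []) := by
  unfold pvStepB
  rw [List.getD_eq_getElem _ _ (by simpa using hk)]
  simp

lemma pvAun_step (as : List Int) (x : Int) :
    pvAun (as ++ [x]) = pvStepB (pvAun as) x := by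
  apply pvExtGetD
  · rw [pvAun_length]
    simp [pvStepB, pvAun_length]
  · intro k hk
    rw [pvAun_length] at hk
    rw [pvStepB_getD _ _ _ (by rw [pvAun_length]; simpa using hk), pvAun_length]
    rw [pvAun_getD]
    rw [show (as ++ [x]).length = as.length + 1 by simp]
    rw [show (2 : Nat) ^ (as.length + 1) = 2 ^ as.length + 2 ^ as.length by ring]
    rw [List.range_add, List.filter_append, List.map_append]
    congr 1
    · -- masks with top bit 0: same slot, same value as for the prefix
      have hf : (List.range (2 ^ as.length)).filter (fun j => pvSlot (as ++ [x]) j == k) =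
          (List.range (2 ^ as.length)).filter (fun j => pvSlot as j == k) :=
        List.filter_congr (fun j hj => by
          rw [pvSlot_low as x j (by simpa using hj)])
      rw [hf]
      have h1 : ((List.range (2 ^ as.length)).filter (fun j => pvSlot as j == k)).map
            (pvVal (as ++ [x])) =
          ((List.range (2 ^ as.length)).filter (fun j => pvSlot as j == k)).map (pvVal as) := by
        apply List.map_congr_left
        intro j hj
        have hjr : j < 2 ^ as.length := by
          have := (List.mem_filter.mp hj).1
          simpa using this
        exact pvVal_low as x j hjr
      rw [h1, ← pvAun_getD]
      by_cases hk1 : k < as.length + 1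
      · rw [if_pos hk1]
      · rw [if_neg hk1, List.getD_eq_default]
        rw [pvAun_length]
        omega
    · -- masks with top bit 1: slot + 1, value + x
      rw [List.filter_map, List.map_map]
      cases k with
      | zero =>
        rw [if_neg (by omega)]
        have hnil : (List.range (2 ^ as.length)).filter
            ((fun j => pvSlot (as ++ [x]) j == 0) ∘ (fun j => 2 ^ as.length + j)) = [] := by
          rw [List.filter_eq_nil_iff]
          intro j hj
          simp only [Function.comp_apply]
          rw [pvSlot_high as x j (by simpa using hj)]
          simp
        rw [hnil]
        rfl
      | succ k' =>
        rw [if_pos (by omega)]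
        simp only [Nat.add_sub_cancel]
        have hf : (List.range (2 ^ as.length)).filter
              ((fun j => pvSlot (as ++ [x]) j == k' + 1) ∘ (fun j => 2 ^ as.length + j)) =
            (List.range (2 ^ as.length)).filter (fun j => pvSlot as j == k') := by
          apply List.filter_congr
          intro j hj
          simp only [Function.comp_apply]
          rw [pvSlot_high as x j (by simpa using hj)]
          simp
        rw [hf, pvAun_getD, List.map_map]
        apply List.map_congr_left
        intro j hj
        have hjr : j < 2 ^ as.length := by
          have := (List.mem_filter.mp hj).1
          simpa using this
        simp only [Function.comp_apply]
        exact pvVal_high as x j hjr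

lemma pvAun_eq_foldB (a : List Int) : pvAun a = a.foldl pvStepB [[0]] := by
  induction a using List.reverseRecOn with
  | nil => decide
  | append_singleton as x ih => rw [pvAun_step, ih, List.foldl_append]; rfl

-- ===== VERDICT (by name: the statement is the Claim_ definition above) =====
theorem bit_aggregate_py_spec : Claim_equal_bit_aggregate_py := by
  intro a _
  show List.map (fun bj => PySem.List.sorted bj (fun x => x) false) (pvAun a) =
    List.map (fun g => PySem.List.sorted g (fun x => x) false) (a.foldl pvStepB [[0]])
  rw [pvAun_eq_foldB]
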